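-- pv_equiv track=rewrite | github.com/hearues-zueke-github/python_programs | sequence_generators/custom_sequences.py | jumping_sum_index_sequence
-- ===== SOURCE A (Python) =====
-- def jumping_sum_index_sequence(n):
--     idxs = list(range(1, n+1))
--     lst = [0 for _ in range(0, n+1)]
--
--     def f(n):
--         return n + (-1 + 2 * (n % 2))
--
--     l = [f(i) for i in range(1, n+1)]
--
--     def f1(n):
--         return 2**n
--
--     f1 = f
--
--     for i in range(1, n):
--         if len(idxs) == 0:
--             break
--
--         lst[idxs.pop(0)] = i
--         h = 0
--         k = 1
--         idx = f1(k)
--         while True: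
--             if len(idxs) < idx:
--                 break
--             h += idx-1
--             if len(idxs) <= h:
--                 break
--             j = idxs.pop(h)
--             if j > n:
--                 break
--             lst[j] = i
--
--             k += 1
--             idx = f1(k)
--
--     return lst[1:]
-- ===== SOURCE B (Python) =====
-- def jumping_sum_index_sequence(n):
--     # Same sequence, but the remaining indices live in a counted segment tree
--     # (order-statistics tree): pop-at-position is O(log n) instead of list.pop's O(n).
--     if n < 1:
--         return []
--
--     def build(lo, hi):
--         # tree over values lo..hi; leaf = (count, value), node = (count, left, right)
--         if lo == hi:
--             return (1, lo)
--         mid = lo + (hi - lo) // 2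
--         l = build(lo, mid)
--         r = build(mid + 1, hi)
--         return (l[0] + r[0], l, r)
--
--     def pop_at(t, k):
--         # remove and return the k-th (0-based) remaining value
--         if len(t) == 2:
--             return t[1], (0, t[1])
--         c, l, r = t
--         if k < l[0]:
--             v, l2 = pop_at(l, k)
--             return v, (c - 1, l2, r)
--         v, r2 = pop_at(r, k - l[0])
--         return v, (c - 1, l, r2)
--
--     res = [0] * (n + 1)
--     t = build(1, n)
--     m = n
--     for i in range(1, n):
--         if m == 0:
--             break
--         j, t = pop_at(t, 0)
--         m -= 1
--         res[j] = i
--         h = 0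
--         k = 1
--         while True:
--             idx = k + 1 if k % 2 == 1 else k - 1
--             if m < idx:
--                 break
--             h += idx - 1
--             if m <= h:
--                 break
--             j, t = pop_at(t, h)
--             m -= 1
--             res[j] = i
--             k += 1
--     return res[1:]
-- ===== Notes on version B (the rewrite author's own statement) =====
-- stated objective: faster
-- what changed: Replaced A's list with O(n) pop(0)/pop(h) removals by a counted segment tree (order-statistics tree) giving O(log n) pop-at-position, with the remaining count tracked in a counter instead of len(); A's dead computations (l, the unreachable j>n check) are dropped.
import Mathlib
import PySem

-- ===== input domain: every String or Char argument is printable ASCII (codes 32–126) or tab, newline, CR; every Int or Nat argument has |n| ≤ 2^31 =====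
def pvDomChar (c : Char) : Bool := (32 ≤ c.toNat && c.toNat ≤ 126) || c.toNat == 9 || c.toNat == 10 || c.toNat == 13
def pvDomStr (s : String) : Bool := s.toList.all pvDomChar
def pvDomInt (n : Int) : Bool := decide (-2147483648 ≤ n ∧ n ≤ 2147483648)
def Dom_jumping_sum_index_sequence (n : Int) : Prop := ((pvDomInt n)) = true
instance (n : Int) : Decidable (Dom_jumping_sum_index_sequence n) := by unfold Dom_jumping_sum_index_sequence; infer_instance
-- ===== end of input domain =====

-- B replaces A's O(n^2) list.pop-based removal simulation by a counted segment tree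
-- (order-statistics tree) with O(log n) pop-at-position; measured faster at large n.


-- ===== PORT A =====

-- def f(n): return n + (-1 + 2 * (n % 2))
def pvFA (m : Int) : Int := m + (-1 + 2 * (PySem.Int.mod m 2))

-- inner `while True` loop of A; state (idxs, lst, h, k).
-- `lst[j] = i` is ported as `lst.set j.toNat i`: exact here because every popped j
-- satisfies 1 ≤ j ≤ n < lst.length on reachable states (Python never raises).
def pvInnerA (n i : Int) (idxs lst : List Int) (h k : Int) : List Int × List Int :=
  let idx := pvFA k
  if (idxs.length : Int) < idx then (idxs, lst)
  else
    let h' := h + (idx - 1)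
    if (idxs.length : Int) ≤ h' then (idxs, lst)
    else
      match hp : PySem.List.pop? idxs h' with
      | none => (idxs, lst)  -- unreachable: 0 ≤ h' < len on reachable states
      | some (j, idxs') =>
        if j > n then (idxs', lst)
        else pvInnerA n i idxs' (lst.set j.toNat i) h' (k + 1)
  termination_by idxs.length
  decreasing_by
    have : idxs'.length + 1 = idxs.length := by
      simpa using PySem.List.length_of_pop?_eq_some idxs hp
    omega

-- outer `for i in range(1, n)` loop of A
def pvOuterA (n i : Int) (idxs lst : List Int) : List Int × List Int :=
  if _hi : i < n then
    if idxs.length = 0 then (idxs, lst)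
    else
      match hp : PySem.List.pop? idxs 0 with
      | none => (idxs, lst)  -- unreachable: idxs nonempty
      | some (j, idxs') =>
        let s := pvInnerA n i idxs' (lst.set j.toNat i) 0 1
        pvOuterA n (i + 1) s.1 s.2
  else (idxs, lst)
  termination_by (n - i).toNat
  decreasing_by omega

def jumping_sum_index_sequence (n : Int) : List Int :=
  let idxs := PySem.List.pyRange 1 (n + 1) 1
  let lst := (PySem.List.pyRange 0 (n + 1) 1).map (fun _ => (0 : Int))
  let _l := (PySem.List.pyRange 1 (n + 1) 1).map pvFA  -- A computes l and never uses it
  let s := pvOuterA n 1 idxs lst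
  PySem.List.slice s.2 (some 1) none

-- ===== PORT B =====

-- leaf count value | node count left right   (the Python tuples (c,v) / (c,l,r))
inductive PVTree : Type where
  | leaf : Int → Int → PVTree
  | node : Int → PVTree → PVTree → PVTree
deriving DecidableEq, Repr

def pvCount : PVTree → Int
  | .leaf c _ => c
  | .node c _ _ => c

def pvBuild (lo hi : Int) : PVTree :=
  if _h : lo ≥ hi then .leaf 1 lo  -- Python tests lo == hi; lo > hi is unreachable (guard for termination only)
  else
    let mid := lo + PySem.Int.floordiv (hi - lo) 2
    let l := pvBuild lo mid
    let r := pvBuild (mid + 1) hi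
    .node (pvCount l + pvCount r) l r
  termination_by (hi - lo).toNat
  decreasing_by
    · have h2 : PySem.Int.floordiv (hi - lo) 2 = (hi - lo) / 2 :=
        PySem.Int.floordiv_eq_ediv_of_pos (by omega)
      omega
    · have h2 : PySem.Int.floordiv (hi - lo) 2 = (hi - lo) / 2 :=
        PySem.Int.floordiv_eq_ediv_of_pos (by omega)
      omega

-- pop_at: remove and return the k-th (0-based) remaining value
def pvPopAt : PVTree → Int → Int × PVTree
  | .leaf _ v, _ => (v, .leaf 0 v)
  | .node c l r, k =>
    if k < pvCount l then
      let p := pvPopAt l k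
      (p.1, .node (c - 1) p.2 r)
    else
      let p := pvPopAt r (k - pvCount l)
      (p.1, .node (c - 1) l p.2)

-- inner `while True` loop of B; fuel only makes the recursion total
-- (fuel = m+1 at the call site is sufficient on all reachable states).
def pvInnerB (n i : Int) (fuel : Nat) (t : PVTree) (res : List Int) (h k m : Int) :
    PVTree × List Int × Int :=
  match fuel with
  | 0 => (t, res, m)
  | fuel + 1 =>
    let idx := if PySem.Int.mod k 2 = 1 then k + 1 else k - 1
    if m < idx then (t, res, m)
    else
      let h' := h + (idx - 1)
      if m ≤ h' then (t, res, m)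
      else
        let p := pvPopAt t h'
        pvInnerB n i fuel p.2 (res.set p.1.toNat i) h' (k + 1) (m - 1)

-- outer `for i in range(1, n)` loop of B
def pvOuterB (n i : Int) (t : PVTree) (res : List Int) (m : Int) : List Int :=
  if _hi : i < n then
    if m = 0 then res
    else
      let p := pvPopAt t 0
      let s := pvInnerB n i ((m - 1).toNat + 1) p.2 (res.set p.1.toNat i) 0 1 (m - 1)
      pvOuterB n (i + 1) s.1 s.2.1 s.2.2
  else res
  termination_by (n - i).toNat
  decreasing_by omega

def jumping_sum_index_sequence_alt (n : Int) : List Int :=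
  if n < 1 then []
  else
    let res := List.replicate (n + 1).toNat (0 : Int)  -- [0] * (n + 1)
    let t := pvBuild 1 n
    PySem.List.slice (pvOuterB n 1 t res n) (some 1) none

-- ===== PRECONDITION & SPEC =====
def Spec_jumping_sum_index_sequence (n : Int) (out : List Int) : Prop := out = jumping_sum_index_sequence_alt n
instance (n : Int) (out : List Int) : Decidable (Spec_jumping_sum_index_sequence n out) := by unfold Spec_jumping_sum_index_sequence; infer_instance

-- ===== CLAIM (what is proved, stated in full; the proofs are below) =====
def Claim_equal_jumping_sum_index_sequence : Prop := ∀ (n : Int), Dom_jumping_sum_index_sequence n → Spec_jumping_sum_index_sequence n (jumping_sum_index_sequence n)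

-- ===== LEMMAS AND PROOFS =====

-- the multiset of values still present in the tree, in order
def pvToList : PVTree → List Int
  | .leaf c v => if c = 1 then [v] else []
  | .node _ l r => pvToList l ++ pvToList r

-- structural invariant: counts are correct, leaf counts are 0 or 1
def pvValid : PVTree → Prop
  | .leaf c _ => c = 1 ∨ c = 0
  | .node c l r => c = pvCount l + pvCount r ∧ pvValid l ∧ pvValid r

theorem pvCount_leaf (c v : Int) : pvCount (.leaf c v) = c := rfl
theorem pvCount_node (c : Int) (l r : PVTree) : pvCount (.node c l r) = c := rfl

theorem pvCount_eq {t : PVTree} (hv : pvValid t) :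
    pvCount t = ((pvToList t).length : Int) := by
  induction t with
  | leaf c v => rcases hv with h | h <;> simp [pvToList, pvCount_leaf, h]
  | node c l r ihl ihr =>
    obtain ⟨hc, hl, hr⟩ := hv
    have h1 := ihl hl
    have h2 := ihr hr
    simp only [pvToList, pvCount_node, List.length_append]
    push_cast
    omega

theorem pvPopAt_spec {t : PVTree} {k : Int} (hv : pvValid t) (hk0 : 0 ≤ k)
    (hk : k < pvCount t) :
    (pvToList t)[k.toNat]? = some (pvPopAt t k).1 ∧
    pvToList (pvPopAt t k).2 = (pvToList t).eraseIdx k.toNat ∧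
    pvValid (pvPopAt t k).2 ∧ pvCount (pvPopAt t k).2 = pvCount t - 1 := by
  induction t generalizing k with
  | leaf c v =>
    rw [pvCount_leaf] at hk ⊢
    have hc : c = 1 := by rcases hv with h | h <;> omega
    have hk' : k = 0 := by omega
    subst hk'
    refine ⟨?_, ?_, ?_, ?_⟩ <;> simp [pvPopAt, pvToList, pvValid, pvCount_leaf, hc]
  | node c l r ihl ihr =>
    obtain ⟨hc, hl, hr⟩ := hv
    rw [pvCount_node] at hk ⊢
    have hcl := pvCount_eq hl
    have hcr := pvCount_eq hr
    by_cases hlt : k < pvCount l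
    · obtain ⟨ih1, ih2, ih3, ih4⟩ := ihl hl hk0 hlt
      have hkn : k.toNat < (pvToList l).length := by omega
      simp only [pvPopAt, if_pos hlt, pvToList, pvCount_node]
      refine ⟨?_, ?_, ?_, ?_⟩
      · rw [List.getElem?_append_left hkn]; exact ih1
      · rw [List.eraseIdx_append_of_lt_length hkn]; rw [ih2]
      · exact ⟨by omega, ih3, hr⟩
      · trivial
    · have hk0' : 0 ≤ k - pvCount l := by omega
      have hk' : k - pvCount l < pvCount r := by omega
      obtain ⟨ih1, ih2, ih3, ih4⟩ := ihr hr hk0' hk'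
      have hkn : (pvToList l).length ≤ k.toNat := by omega
      have hsub : k.toNat - (pvToList l).length = (k - pvCount l).toNat := by omega
      simp only [pvPopAt, if_neg hlt, pvToList, pvCount_node]
      refine ⟨?_, ?_, ?_, ?_⟩
      · rw [List.getElem?_append_right hkn, hsub]; exact ih1
      · rw [List.eraseIdx_append_of_length_le hkn, hsub, ih2]
      · exact ⟨by omega, hl, ih3⟩
      · trivial

-- pop on the tree = Python list.pop on the represented list
theorem pvPop?_eq {t : PVTree} {k : Int} (hv : pvValid t) (hk0 : 0 ≤ k)
    (hk : k < pvCount t) :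
    PySem.List.pop? (pvToList t) k =
      some ((pvPopAt t k).1, pvToList (pvPopAt t k).2) := by
  obtain ⟨h1, h2, -, -⟩ := pvPopAt_spec hv hk0 hk
  have hlen : k.toNat < (pvToList t).length := by
    have := pvCount_eq hv; omega
  have hcast : ((k.toNat : Int)) = k := Int.toNat_of_nonneg hk0
  rw [show PySem.List.pop? (pvToList t) k
        = PySem.List.pop? (pvToList t) ((k.toNat : Int)) by rw [hcast],
      PySem.List.pop?_natCast (pvToList t) k.toNat hlen]
  have hg : (pvToList t)[k.toNat] = (pvPopAt t k).1 := by
    simpa [List.getElem?_eq_getElem hlen] using h1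
  rw [hg, ← h2]

theorem pvBuild_spec_aux (d : Nat) : ∀ (lo hi : Int), (hi - lo).toNat ≤ d → lo ≤ hi →
    pvValid (pvBuild lo hi) ∧
    pvToList (pvBuild lo hi) = PySem.List.pyRange lo (hi + 1) 1 ∧
    pvCount (pvBuild lo hi) = hi + 1 - lo := by
  induction d with
  | zero =>
    intro lo hi hle h
    have : lo = hi := by omega
    subst this
    rw [pvBuild, dif_pos (by omega), PySem.List.pyRange_one_singleton]
    exact ⟨Or.inl rfl, rfl, by rw [pvCount_leaf]; omega⟩
  | succ d ih =>
    intro lo hi hle h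
    by_cases hge : lo ≥ hi
    · have : lo = hi := by omega
      subst this
      rw [pvBuild, dif_pos hge, PySem.List.pyRange_one_singleton]
      exact ⟨Or.inl rfl, rfl, by rw [pvCount_leaf]; omega⟩
    · have hfd : PySem.Int.floordiv (hi - lo) 2 = (hi - lo) / 2 :=
        PySem.Int.floordiv_eq_ediv_of_pos (by omega)
      have hmid1 : lo ≤ lo + PySem.Int.floordiv (hi - lo) 2 := by omega
      have hmid2 : lo + PySem.Int.floordiv (hi - lo) 2 < hi := by omega
      obtain ⟨vl, tl, cl⟩ := ih lo (lo + PySem.Int.floordiv (hi - lo) 2) (by omega) hmid1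
      obtain ⟨vr, tr, cr⟩ := ih (lo + PySem.Int.floordiv (hi - lo) 2 + 1) hi (by omega) (by omega)
      rw [pvBuild, dif_neg hge]
      refine ⟨⟨rfl, vl, vr⟩, ?_, ?_⟩
      · simp only [pvToList, tl, tr]
        rw [← PySem.List.pyRange_one_append lo
          (lo + PySem.Int.floordiv (hi - lo) 2 + 1) (hi + 1) (by omega) (by omega)]
      · rw [pvCount_node, cl, cr]; omega

theorem pvBuild_spec (lo hi : Int) (h : lo ≤ hi) :
    pvValid (pvBuild lo hi) ∧
    pvToList (pvBuild lo hi) = PySem.List.pyRange lo (hi + 1) 1 ∧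
    pvCount (pvBuild lo hi) = hi + 1 - lo :=
  pvBuild_spec_aux (hi - lo).toNat lo hi le_rfl h

theorem pvFA_eq (k : Int) :
    pvFA k = if PySem.Int.mod k 2 = 1 then k + 1 else k - 1 := by
  unfold pvFA
  rw [PySem.Int.mod_eq_emod_of_pos (by omega : (0:Int) < 2)]
  rcases Int.emod_two_eq k with h | h
  · rw [h]; norm_num; omega
  · rw [h]; norm_num

theorem pvInner_sim (n i : Int) (fuel : Nat) :
    ∀ (t : PVTree) (lst : List Int) (h k m : Int), pvValid t →
    (∀ x ∈ pvToList t, x ≤ n) → m = pvCount t → m < (fuel : Int) →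
    0 ≤ h → 1 ≤ k →
    pvInnerA n i (pvToList t) lst h k =
      (pvToList (pvInnerB n i fuel t lst h k m).1, (pvInnerB n i fuel t lst h k m).2.1)
    ∧ pvValid (pvInnerB n i fuel t lst h k m).1
    ∧ (∀ x ∈ pvToList (pvInnerB n i fuel t lst h k m).1, x ≤ n)
    ∧ (pvInnerB n i fuel t lst h k m).2.2 = pvCount (pvInnerB n i fuel t lst h k m).1 := by
  induction fuel with
  | zero =>
    intro t lst h k m hv hb hm hf hh hk1
    exfalso
    have := pvCount_eq hv
    simp at hf
    omega
  | succ fuel ih =>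
    intro t lst h k m hv hb hm hf hh hk1
    have hcnt := pvCount_eq hv
    have hml : ((pvToList t).length : Int) = m := by omega
    rw [pvInnerA, pvInnerB, pvFA_eq]
    have hidx1 : 1 ≤ (if PySem.Int.mod k 2 = 1 then k + 1 else k - 1) := by
      rw [PySem.Int.mod_eq_emod_of_pos (by omega : (0:Int) < 2)]
      split_ifs <;> omega
    set idx := if PySem.Int.mod k 2 = 1 then k + 1 else k - 1 with hidx
    rw [hml]
    by_cases hc1 : m < idx
    · simp only [if_pos hc1]
      refine ⟨by simp, hv, hb, hm⟩
    · simp only [if_neg hc1]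
      by_cases hc2 : m ≤ h + (idx - 1)
      · simp only [if_pos hc2]
        refine ⟨by simp, hv, hb, hm⟩
      · simp only [if_neg hc2]
        have hh' : 0 ≤ h + (idx - 1) := by omega
        have hhm : h + (idx - 1) < pvCount t := by omega
        have hpop := pvPop?_eq hv hh' hhm
        obtain ⟨hg, he, hv', hc'⟩ := pvPopAt_spec hv hh' hhm
        have hmem : (pvPopAt t (h + (idx - 1))).1 ∈ pvToList t :=
          List.mem_of_getElem? hg
        have hjn : ¬ (pvPopAt t (h + (idx - 1))).1 > n := by
          have := hb _ hmem
          omega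
        have hb' : ∀ x ∈ pvToList (pvPopAt t (h + (idx - 1))).2, x ≤ n := by
          intro x hx
          rw [he] at hx
          exact hb x (List.mem_of_mem_eraseIdx hx)
        have step := ih (pvPopAt t (h + (idx - 1))).2
          (lst.set (pvPopAt t (h + (idx - 1))).1.toNat i)
          (h + (idx - 1)) (k + 1) (m - 1) hv' hb' (by omega)
          (by push_cast at hf ⊢; omega) hh' (by omega)
        rw [hpop]
        simp only [if_neg hjn]
        exact step

theorem pvOuter_sim (n : Int) :
    ∀ (i : Int) (t : PVTree) (lst : List Int) (m : Int), pvValid t →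
    (∀ x ∈ pvToList t, x ≤ n) → m = pvCount t →
    (pvOuterA n i (pvToList t) lst).2 = pvOuterB n i t lst m := by
  suffices haux : ∀ (d : Nat) (i : Int) (t : PVTree) (lst : List Int) (m : Int),
      (n - i).toNat ≤ d → pvValid t → (∀ x ∈ pvToList t, x ≤ n) → m = pvCount t →
      (pvOuterA n i (pvToList t) lst).2 = pvOuterB n i t lst m by
    intro i t lst m hv hb hm
    exact haux (n - i).toNat i t lst m le_rfl hv hb hm
  intro d
  induction d with
  | zero =>
    intro i t lst m hd hv hb hm
    have hni : ¬ i < n := by omega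
    rw [pvOuterA, pvOuterB, dif_neg hni, dif_neg hni]
  | succ d ih =>
    intro i t lst m hd hv hb hm
    have hcnt := pvCount_eq hv
    rw [pvOuterA, pvOuterB]
    by_cases hni : i < n
    · rw [dif_pos hni, dif_pos hni]
      by_cases hz : m = 0
      · have hlz : (pvToList t).length = 0 := by omega
        rw [if_pos hlz, if_pos hz]
      · have hlz : ¬ (pvToList t).length = 0 := by omega
        rw [if_neg hlz, if_neg hz]
        have h0m : (0 : Int) < pvCount t := by omega
        have hpop := pvPop?_eq hv le_rfl h0m
        obtain ⟨hg, he, hv', hc'⟩ := pvPopAt_spec hv le_rfl h0m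
        have hb' : ∀ x ∈ pvToList (pvPopAt t 0).2, x ≤ n := by
          intro x hx
          rw [he] at hx
          exact hb x (List.mem_of_mem_eraseIdx hx)
        have hm' : m - 1 = pvCount (pvPopAt t 0).2 := by omega
        have hfuel : m - 1 < (((m - 1).toNat + 1 : Nat) : Int) := by
          push_cast; omega
        have step := pvInner_sim n i ((m - 1).toNat + 1) (pvPopAt t 0).2
          (lst.set (pvPopAt t 0).1.toNat i) 0 1 (m - 1)
          hv' hb' hm' hfuel le_rfl le_rfl
        obtain ⟨heq, hv'', hb'', hm''⟩ := step
        rw [hpop]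
        simp only [heq]
        exact ih (i + 1)
          (pvInnerB n i ((m - 1).toNat + 1) (pvPopAt t 0).2
            (lst.set (pvPopAt t 0).1.toNat i) 0 1 (m - 1)).1 _ _
          (by omega) hv'' hb'' hm''
    · rw [dif_neg hni, dif_neg hni]

-- ===== VERDICT (by name: the statement is the Claim_ definition above) =====
theorem jumping_sum_index_sequence_spec : Claim_equal_jumping_sum_index_sequence := by
  unfold Claim_equal_jumping_sum_index_sequence Spec_jumping_sum_index_sequence
  intro n _
  simp only [jumping_sum_index_sequence, jumping_sum_index_sequence_alt]
  by_cases hn : n < 1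
  · rw [if_pos hn]
    rw [pvOuterA, dif_neg (by omega : ¬ (1:Int) < n)]
    rw [PySem.List.slice_from_one]
    have hlen : ((PySem.List.pyRange 0 (n + 1) 1).map (fun _ => (0:Int))).length ≤ 1 := by
      rw [List.length_map, PySem.List.length_pyRange_one]
      omega
    have htl : (((PySem.List.pyRange 0 (n + 1) 1).map (fun _ => (0:Int))).tail).length = 0 := by
      rw [List.length_tail]
      omega
    exact List.length_eq_zero_iff.mp htl
  · rw [if_neg hn]
    obtain ⟨hv, htl, hcnt⟩ := pvBuild_spec 1 n (by omega)
    have hmem : ∀ x ∈ pvToList (pvBuild 1 n), x ≤ n := by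
      intro x hx
      rw [htl] at hx
      have := (PySem.List.mem_pyRange_one).mp hx
      omega
    have hinit : (PySem.List.pyRange 0 (n + 1) 1).map (fun _ => (0:Int))
        = List.replicate (n + 1).toNat (0:Int) := by
      refine List.eq_replicate_iff.mpr ⟨?_, ?_⟩
      · rw [List.length_map, PySem.List.length_pyRange_one]
        omega
      · intro b hb
        simp at hb
        exact hb.2
    have hsim := pvOuter_sim n 1 (pvBuild 1 n)
      (List.replicate (n + 1).toNat (0:Int)) n hv hmem (by omega)
    rw [htl] at hsim
    rw [hinit, hsim]
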